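-- pv_equiv track=rewrite | github.com/CyberGuard-Anil/uasm | uasm/modules/web_recon.py | _select_main_subdomains
-- ===== SOURCE A (Python) =====
-- from typing import Dict, List, Any, Optional, Set
--
-- def _select_main_subdomains(subdomains: List[str]) -> List[str]:
--     """Select main subdomains for detailed analysis"""
--     # Prioritize common subdomains
--     priority_subdomains = []
--     common_names = ['www', 'api', 'app', 'admin', 'portal', 'mail', 'blog']
--
--     for subdomain in subdomains:
--         subdomain_name = subdomain.split('.')[0]
--         if subdomain_name in common_names:
--             priority_subdomains.append(subdomain)
--
--     # Add random subdomains if we have room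
--     remaining = [s for s in subdomains if s not in priority_subdomains]
--     priority_subdomains.extend(remaining[:max(0, 10 - len(priority_subdomains))])
--
--     return priority_subdomains[:10]  # Limit to 10 subdomains
-- ===== SOURCE B (Python) =====
-- def _select_main_subdomains(subdomains):
--     """Select main subdomains for detailed analysis.
--
--     A stable sort by a single boolean key (non-priority last) yields the
--     priority names first in input order, then the rest in input order;
--     the first 10 of that are exactly the prioritized selection."""
--     common_names = {'www', 'api', 'app', 'admin', 'portal', 'mail', 'blog'}
--     return sorted(subdomains, key=lambda s: s.split('.')[0] not in common_names)[:10]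
-- ===== Notes on version B (the rewrite author's own statement) =====
-- stated objective: simpler
-- what changed: A's two explicit scans (build a priority list, then re-filter the whole input with a quadratic 'not in' membership test and splice a budgeted slice) are replaced by a one-line stable sort on a single boolean key (non-priority last) followed by [:10]; stability makes both groups keep input order, so the first 10 coincide with A's selection.
import Mathlib
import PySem

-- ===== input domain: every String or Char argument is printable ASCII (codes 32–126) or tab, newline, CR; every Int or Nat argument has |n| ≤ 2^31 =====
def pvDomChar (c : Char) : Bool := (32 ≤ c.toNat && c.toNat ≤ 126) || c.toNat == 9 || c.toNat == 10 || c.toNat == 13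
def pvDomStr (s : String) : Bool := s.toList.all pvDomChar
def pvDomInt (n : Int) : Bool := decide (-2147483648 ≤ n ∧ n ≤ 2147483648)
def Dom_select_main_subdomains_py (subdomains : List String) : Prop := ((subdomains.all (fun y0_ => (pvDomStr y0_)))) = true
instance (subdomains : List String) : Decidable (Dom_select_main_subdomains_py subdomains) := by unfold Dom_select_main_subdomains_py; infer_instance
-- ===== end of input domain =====

-- B replaces A's build-priority-list-then-refilter-and-splice procedure by a single stable sort on a
-- boolean key (non-priority last) followed by [:10]; objective: simpler (one line, no membership test).

-- ===== PORT A =====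
-- subdomain.split('.')[0]  (splitOn with a nonempty separator never returns [], so [0] is headD)
def pvFirstLabel (s : String) : String := ((PySem.Str.split? s ".").getD []).headD ""

def pvCommonNames : List String := ["www", "api", "app", "admin", "portal", "mail", "blog"]

def select_main_subdomains_py (subdomains : List String) : List String :=
  -- for subdomain in subdomains: if subdomain.split('.')[0] in common_names: priority.append(subdomain)
  let priority := subdomains.foldl
    (fun acc s => if pvCommonNames.contains (pvFirstLabel s) then acc ++ [s] else acc) []
  -- remaining = [s for s in subdomains if s not in priority_subdomains]
  let remaining := subdomains.filter (fun s => !(priority.contains s))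
  -- priority_subdomains.extend(remaining[:max(0, 10 - len(priority_subdomains))])
  let priority2 := priority ++ PySem.List.slice remaining none (some (max 0 (10 - (priority.length : Int))))
  -- return priority_subdomains[:10]
  PySem.List.slice priority2 none (some 10)

-- ===== PORT B =====
-- common_names = {'www', 'api', 'app', 'admin', 'portal', 'mail', 'blog'}  (a Python set)
def pvCommonSet : PySem.Set String := PySem.Set.ofList ["www", "api", "app", "admin", "portal", "mail", "blog"]

def select_main_subdomains_py_alt (subdomains : List String) : List String :=
  -- sorted(subdomains, key=lambda s: s.split('.')[0] not in common_names)[:10]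
  -- Python bools sort as the ints 0/1, so the boolean key is ported as a 0/1 Nat key.
  PySem.List.slice
    (PySem.List.sorted subdomains
      (fun s => if !(pvCommonSet.contains (pvFirstLabel s)) then (1 : Nat) else 0) false)
    none (some 10)

-- ===== PRECONDITION & SPEC =====
def Spec_select_main_subdomains_py (subdomains : List String) (out : List String) : Prop := out = select_main_subdomains_py_alt subdomains
instance (subdomains : List String) (out : List String) : Decidable (Spec_select_main_subdomains_py subdomains out) := by unfold Spec_select_main_subdomains_py; infer_instance

-- ===== CLAIM (what is proved, stated in full; the proofs are below) =====
def Claim_equal_select_main_subdomains_py : Prop := ∀ (subdomains : List String), Dom_select_main_subdomains_py subdomains → Spec_select_main_subdomains_py subdomains (select_main_subdomains_py subdomains)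

-- ===== LEMMAS AND PROOFS =====

-- the test both programs apply to an element
def pvP (s : String) : Bool := pvCommonNames.contains (pvFirstLabel s)

-- B's 0/1 key
def pvKey (s : String) : Nat := if pvP s then 0 else 1

theorem pvCommonSet_eq : pvCommonSet = pvCommonNames := by decide

-- insertBy places x before the block 'ones' when it beats all of it and none of 'zeros'
theorem pv_insertBy_mid (before : String → String → Bool) (x : String) (zeros ones : List String)
    (hz : ∀ z ∈ zeros, before x z = false) (ho : ∀ o ∈ ones, before x o = true) :
    PySem.List.insertBy before x (zeros ++ ones) = zeros ++ x :: ones := by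
  induction zeros with
  | nil =>
    cases ones with
    | nil => simp [PySem.List.insertBy]
    | cons o os => simp [PySem.List.insertBy, ho o (by simp)]
  | cons z zs ih =>
    simp only [List.cons_append, PySem.List.insertBy, hz z (by simp)]
    simp only [Bool.false_eq_true, if_false]
    exact congrArg (z :: ·) (ih (fun y hy => hz y (by simp [hy])))

-- the insertion-sort fold with the 0/1 key is the stable partition
theorem pv_fold_partition (xs zeros ones : List String)
    (hz : ∀ z ∈ zeros, pvP z = true) (ho : ∀ o ∈ ones, pvP o = false) :
    xs.foldl (fun acc x => PySem.List.insertBy (fun a b => decide (pvKey a < pvKey b)) x acc)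
        (zeros ++ ones)
      = (zeros ++ xs.filter pvP) ++ (ones ++ xs.filter (fun s => !(pvP s))) := by
  induction xs generalizing zeros ones with
  | nil => simp
  | cons x xs ih =>
    by_cases hx : pvP x
    · have hstep : PySem.List.insertBy (fun a b => decide (pvKey a < pvKey b)) x (zeros ++ ones)
          = (zeros ++ [x]) ++ ones := by
        rw [pv_insertBy_mid _ x zeros ones
          (fun z hzm => by simp [pvKey, hx, hz z hzm])
          (fun o hom => by simp [pvKey, hx, ho o hom])]
        simp
      simp only [List.foldl_cons, hstep]
      rw [ih (zeros ++ [x]) ones (by intro z hzm; rcases List.mem_append.1 hzm with h | h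
                                     · exact hz z h
                                     · simp_all) ho]
      simp [hx]
    · have hstep : PySem.List.insertBy (fun a b => decide (pvKey a < pvKey b)) x (zeros ++ ones)
          = zeros ++ (ones ++ [x]) := by
        rw [PySem.List.insertBy_of_forall_not_before _ x (zeros ++ ones)
          (fun y _ => by by_cases hy : pvP y <;> simp [pvKey, hx, hy])]
        simp
      simp only [List.foldl_cons, hstep]
      rw [ih zeros (ones ++ [x]) hz (by intro o hom; rcases List.mem_append.1 hom with h | h
                                        · exact ho o h
                                        · simp_all)]
      simp [hx]

-- sorted(xs, key = 0/1 flag) is the stable partition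
theorem pv_sorted_eq (xs : List String) :
    PySem.List.sorted xs pvKey false = xs.filter pvP ++ xs.filter (fun s => !(pvP s)) := by
  rw [PySem.List.sorted_eq_foldl_insertBy]
  simpa using pv_fold_partition xs [] [] (by simp) (by simp)

-- an element of the input is in the priority list iff its test holds
theorem pvMemFilter (xs : List String) (s : String) (hs : s ∈ xs) :
    (xs.filter pvP).contains s = pvP s := by
  by_cases h : pvP s <;> simp [List.mem_filter, hs, h]

-- take n (l1 ++ take (n - |l1|) l2) = take n (l1 ++ l2)
theorem pv_take_budget (n : Nat) (l1 l2 : List String) :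
    (l1 ++ l2.take (n - l1.length)).take n = (l1 ++ l2).take n := by
  rw [List.take_append, List.take_append, List.take_take]
  simp

theorem select_main_subdomains_eq (subdomains : List String) :
    select_main_subdomains_py subdomains = select_main_subdomains_py_alt subdomains := by
  unfold select_main_subdomains_py select_main_subdomains_py_alt
  have hfoldA : subdomains.foldl
      (fun acc s => if pvCommonNames.contains (pvFirstLabel s) then acc ++ [s] else acc) []
      = subdomains.filter pvP := by
    simpa [pvP] using
      PySem.List.foldl_append_if_eq_filter (l := subdomains) (p := pvP) (acc := [])
  have hrem : subdomains.filter (fun s => !((subdomains.filter pvP).contains s))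
      = subdomains.filter (fun s => !(pvP s)) := by
    apply List.filter_congr
    intro s hs
    rw [pvMemFilter subdomains s hs]
  have hkey : (fun s => if !(pvCommonSet.contains (pvFirstLabel s)) then (1 : Nat) else 0)
      = pvKey := by
    funext s
    simp [pvKey, pvP, pvCommonSet_eq]
  simp only [hfoldA, hrem, hkey, pv_sorted_eq]
  rw [PySem.List.slice_to _ (b := max 0 (10 - ((subdomains.filter pvP).length : Int))) (by omega),
    PySem.List.slice_to _ (b := 10) (by omega), PySem.List.slice_to _ (b := 10) (by omega)]
  have hc : (max 0 (10 - ((subdomains.filter pvP).length : Int))).toNat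
      = 10 - (subdomains.filter pvP).length := by omega
  rw [hc]
  exact pv_take_budget 10 (subdomains.filter pvP) (subdomains.filter (fun s => !(pvP s)))

-- ===== VERDICT (by name: the statement is the Claim_ definition above) =====
theorem select_main_subdomains_py_spec : Claim_equal_select_main_subdomains_py := by
  intro subdomains _
  unfold Spec_select_main_subdomains_py
  exact select_main_subdomains_eq subdomains
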